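-- pv_equiv track=rewrite | github.com/fockus/swarmline | src/cognitia/runtime/thin/json_utils.py | find_json_object_boundaries
-- ===== SOURCE A (Python) =====
-- def find_json_object_boundaries(text: str, start: int = 0) -> tuple[int, int] | None:
--     """Find json object boundaries."""
--     obj_start = text.find("{", start)
--     if obj_start == -1:
--         return None
--
--     depth = 0
--     in_string = False
--     escape = False
--
--     for idx in range(obj_start, len(text)):
--         ch = text[idx]
--
--         if in_string:
--             if escape:
--                 escape = False
--             elif ch == "\\":
--                 escape = True
--             elif ch == '"':
--                 in_string = False
--             continue
--
--         if ch == '"':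
--             in_string = True
--             continue
--
--         if ch == "{":
--             depth += 1
--         elif ch == "}":
--             depth -= 1
--             if depth == 0:
--                 return (obj_start, idx + 1)
--
--     return None
-- ===== SOURCE B (Python) =====
-- def _string_end(text, i):
--     """Index just past the closing quote of a string whose content starts at i.
--
--     Jumps quote-to-quote with str.find; a found quote is escaped iff it is
--     preceded by an odd run of backslashes.  len(text) if unterminated."""
--     n = len(text)
--     while True:
--         j = text.find('"', i)
--         if j == -1:
--             return n
--         bs = 0
--         k = j - 1
--         while k >= 0 and text[k] == "\\":
--             bs += 1
--             k -= 1
--         if bs % 2 == 0: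
--             return j + 1
--         i = j + 1
--
--
-- def find_json_object_boundaries(text: str, start: int = 0):
--     """Find json object boundaries."""
--     obj_start = text.find("{", start)
--     if obj_start == -1:
--         return None
--
--     depth = 0
--     i = obj_start
--     while True:
--         cands = [p for p in (text.find('"', i), text.find("{", i), text.find("}", i)) if p != -1]
--         if not cands:
--             return None
--         j = min(cands)
--         ch = text[j]
--         if ch == '"':
--             i = _string_end(text, j + 1)
--         elif ch == "{":
--             depth += 1
--             i = j + 1
--         else:
--             depth -= 1
--             if depth == 0:
--                 return (obj_start, j + 1)
--             i = j + 1
-- ===== Notes on version B (the rewrite author's own statement) =====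
-- stated objective: alternative
-- what changed: Replaced A's per-character three-flag automaton (depth/in_string/escape examined at every index) by a jump scanner: str.find jumps straight to the next quote or brace (min of three finds), and string literals are closed by locating the next quote whose preceding backslash run has even parity, so only structurally interesting characters are ever inspected.
import Mathlib
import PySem

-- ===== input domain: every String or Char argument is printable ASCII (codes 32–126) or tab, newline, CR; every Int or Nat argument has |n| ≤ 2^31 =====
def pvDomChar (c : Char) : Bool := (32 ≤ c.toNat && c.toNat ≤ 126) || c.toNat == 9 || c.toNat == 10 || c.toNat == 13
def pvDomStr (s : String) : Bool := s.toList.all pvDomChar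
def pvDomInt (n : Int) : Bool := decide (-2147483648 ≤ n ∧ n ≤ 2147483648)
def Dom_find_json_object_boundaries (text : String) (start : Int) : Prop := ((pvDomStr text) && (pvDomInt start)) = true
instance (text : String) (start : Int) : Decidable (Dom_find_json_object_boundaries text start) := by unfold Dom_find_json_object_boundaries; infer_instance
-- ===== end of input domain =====

-- B replaces A's per-character state machine (depth/in_string/escape over every character) by
-- a jump scanner: str.find jumps directly to the next interesting character (quote or brace),
-- and an escaped quote is recognised by the parity of the backslash run before it; same
-- results, different algorithm (find-jumps + parity test instead of a three-flag automaton).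
-- (The fuel argument of each *Go helper only makes the while/for loop total: the wrapper
-- supplies enough fuel, so behaviour matches the Python exactly.)

-- ===== PORT A =====
-- A's for-idx-in-range loop with state (depth, in_string, escape), early return on depth 0.
def pvALoopGo (cs : List Char) (objStart : Int) :
    Nat → Nat → Int → Bool → Bool → Option (Int × Int)
  | 0, _, _, _, _ => none
  | fuel + 1, idx, depth, inString, escape =>
    if h : idx < cs.length then
      let ch := cs[idx]
      if inString then
        if escape then pvALoopGo cs objStart fuel (idx + 1) depth true false
        else if ch = '\\' then pvALoopGo cs objStart fuel (idx + 1) depth true true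
        else if ch = '"' then pvALoopGo cs objStart fuel (idx + 1) depth false escape
        else pvALoopGo cs objStart fuel (idx + 1) depth inString escape
      else if ch = '"' then pvALoopGo cs objStart fuel (idx + 1) depth true escape
      else if ch = '{' then pvALoopGo cs objStart fuel (idx + 1) (depth + 1) inString escape
      else if ch = '}' then
        let d := depth - 1
        if d = 0 then some (objStart, (idx : Int) + 1)
        else pvALoopGo cs objStart fuel (idx + 1) d inString escape
      else pvALoopGo cs objStart fuel (idx + 1) depth inString escape
    else none

def pvALoop (cs : List Char) (objStart : Int) (idx : Nat) (depth : Int)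
    (inString escape : Bool) : Option (Int × Int) :=
  pvALoopGo cs objStart (cs.length - idx) idx depth inString escape

def find_json_object_boundaries (text : String) (start : Int) : Option (Int × Int) :=
  let obj_start := PySem.Str.findFrom text "{" start none
  if obj_start = -1 then none
  else pvALoop text.toList obj_start obj_start.toNat 0 false false

-- ===== PORT B =====
-- text.find(c, i) for a single character c and 0 ≤ i, returned as Option Nat (-1 ↦ none);
-- exact: scans positions i, i+1, … like CPython's find, none once past the end.
def pvFindChGo (cs : List Char) (c : Char) : Nat → Nat → Option Nat
  | 0, _ => none
  | fuel + 1, i =>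
    if h : i < cs.length then
      if cs[i] = c then some i else pvFindChGo cs c fuel (i + 1)
    else none

def pvFindCh (cs : List Char) (c : Char) (i : Nat) : Option Nat :=
  pvFindChGo cs c (cs.length - i) i

-- Source B's inner `while k >= 0 and text[k] == '\\'` run counter, scanning down from j-1;
-- the out-of-range branch is never reached (j is always a valid index at the call sites).
def pvBsRun (cs : List Char) : Nat → Nat
  | 0 => 0
  | k + 1 =>
    if h : k < cs.length then
      if cs[k] = '\\' then pvBsRun cs k + 1 else 0
    else 0

-- _string_end of Source B: jump find-to-find; a quote closes iff its backslash run is even.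
def pvStrEndGo (cs : List Char) : Nat → Nat → Nat
  | 0, _ => cs.length
  | fuel + 1, i =>
    match pvFindCh cs '"' i with
    | none => cs.length
    | some j => if pvBsRun cs j % 2 = 0 then j + 1 else pvStrEndGo cs fuel (j + 1)

def pvStrEnd (cs : List Char) (i : Nat) : Nat := pvStrEndGo cs (cs.length - i) i

-- Source B's main `while True` loop: jump to the smallest of the three finds ([… if p != -1],
-- min(cands)), then act on that one character.
def pvJumpGo (cs : List Char) (objStart : Int) : Nat → Int → Nat → Option (Int × Int)
  | 0, _, _ => none
  | fuel + 1, depth, i =>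
    match ((pvFindCh cs '"' i).toList ++ (pvFindCh cs '{' i).toList ++
           (pvFindCh cs '}' i).toList).min? with
    | none => none
    | some j =>
      let ch := cs.getD j ' '   -- text[j]; j < len(text) because j came from a find
      if ch = '"' then pvJumpGo cs objStart fuel depth (pvStrEnd cs (j + 1))
      else if ch = '{' then pvJumpGo cs objStart fuel (depth + 1) (j + 1)
      else
        let d := depth - 1
        if d = 0 then some (objStart, (j : Int) + 1)
        else pvJumpGo cs objStart fuel d (j + 1)

def pvJump (cs : List Char) (objStart : Int) (depth : Int) (i : Nat) : Option (Int × Int) :=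
  pvJumpGo cs objStart (cs.length - i) depth i

def find_json_object_boundaries_alt (text : String) (start : Int) : Option (Int × Int) :=
  let obj_start := PySem.Str.findFrom text "{" start none
  if obj_start = -1 then none
  else pvJump text.toList obj_start 0 obj_start.toNat

-- ===== PRECONDITION & SPEC =====
def Spec_find_json_object_boundaries (text : String) (start : Int) (out : Option (Int × Int)) : Prop := out = find_json_object_boundaries_alt text start
instance (text : String) (start : Int) (out : Option (Int × Int)) : Decidable (Spec_find_json_object_boundaries text start out) := by unfold Spec_find_json_object_boundaries; infer_instance

-- ===== CLAIM (what is proved, stated in full; the proofs are below) =====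
def Claim_equal_find_json_object_boundaries : Prop := ∀ (text : String) (start : Int), Dom_find_json_object_boundaries text start → Spec_find_json_object_boundaries text start (find_json_object_boundaries text start)

-- ===== LEMMAS AND PROOFS =====

-- ---- A-side step lemmas ----
theorem pvALoop_out (cs : List Char) (o d : Int) (i : Nat) (s e : Bool) (h : ¬ i < cs.length) :
    pvALoop cs o i d s e = none := by
  unfold pvALoop
  rw [show cs.length - i = 0 from by omega, pvALoopGo]

theorem pvALoop_unfold_pos (cs : List Char) (o d : Int) (i : Nat) (s e : Bool)
    (h : i < cs.length) :
    pvALoop cs o i d s e =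
      (if s then
        if e then pvALoop cs o (i + 1) d true false
        else if cs[i] = '\\' then pvALoop cs o (i + 1) d true true
        else if cs[i] = '"' then pvALoop cs o (i + 1) d false e
        else pvALoop cs o (i + 1) d s e
      else if cs[i] = '"' then pvALoop cs o (i + 1) d true e
      else if cs[i] = '{' then pvALoop cs o (i + 1) (d + 1) s e
      else if cs[i] = '}' then
        if d - 1 = 0 then some (o, (i : Int) + 1) else pvALoop cs o (i + 1) (d - 1) s e
      else pvALoop cs o (i + 1) d s e) := by
  conv_lhs =>
    rw [pvALoop, show cs.length - i = (cs.length - (i + 1)) + 1 from by omega, pvALoopGo,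
      dif_pos h]
  rfl

theorem pvALoop_esc (cs : List Char) (o d : Int) (i : Nat) (h : i < cs.length) :
    pvALoop cs o i d true true = pvALoop cs o (i + 1) d true false := by
  rw [pvALoop_unfold_pos cs o d i true true h]; simp

theorem pvALoop_str_bs (cs : List Char) (o d : Int) (i : Nat) (h : i < cs.length)
    (hb : cs[i] = '\\') : pvALoop cs o i d true false = pvALoop cs o (i + 1) d true true := by
  rw [pvALoop_unfold_pos cs o d i true false h]; simp [hb]

theorem pvALoop_str_q (cs : List Char) (o d : Int) (i : Nat) (h : i < cs.length)
    (hq : cs[i] = '"') : pvALoop cs o i d true false = pvALoop cs o (i + 1) d false false := by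
  rw [pvALoop_unfold_pos cs o d i true false h]; simp [hq]

theorem pvALoop_str_o (cs : List Char) (o d : Int) (i : Nat) (h : i < cs.length)
    (hb : ¬ cs[i] = '\\') (hq : ¬ cs[i] = '"') :
    pvALoop cs o i d true false = pvALoop cs o (i + 1) d true false := by
  rw [pvALoop_unfold_pos cs o d i true false h]; simp [hb, hq]

theorem pvALoop_main_q (cs : List Char) (o d : Int) (i : Nat) (h : i < cs.length)
    (hq : cs[i] = '"') : pvALoop cs o i d false false = pvALoop cs o (i + 1) d true false := by
  rw [pvALoop_unfold_pos cs o d i false false h]; simp [hq]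

theorem pvALoop_main_ob (cs : List Char) (o d : Int) (i : Nat) (h : i < cs.length)
    (ho : cs[i] = '{') : pvALoop cs o i d false false = pvALoop cs o (i + 1) (d + 1) false false := by
  rw [pvALoop_unfold_pos cs o d i false false h]; simp [ho]

theorem pvALoop_main_cb (cs : List Char) (o d : Int) (i : Nat) (h : i < cs.length)
    (hc : cs[i] = '}') : pvALoop cs o i d false false =
      (if d - 1 = 0 then some (o, (i : Int) + 1) else pvALoop cs o (i + 1) (d - 1) false false) := by
  rw [pvALoop_unfold_pos cs o d i false false h]; simp [hc]

theorem pvALoop_main_o (cs : List Char) (o d : Int) (i : Nat) (h : i < cs.length)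
    (hq : ¬ cs[i] = '"') (ho : ¬ cs[i] = '{') (hc : ¬ cs[i] = '}') :
    pvALoop cs o i d false false = pvALoop cs o (i + 1) d false false := by
  rw [pvALoop_unfold_pos cs o d i false false h]; simp [hq, ho, hc]

-- ---- pvFindCh: what the find result means ----
theorem pvFindChGo_none (cs : List Char) (c : Char) (f : Nat) :
    ∀ i, cs.length - i ≤ f → pvFindChGo cs c f i = none →
    ∀ m (_ : m < cs.length), i ≤ m → cs[m] ≠ c := by
  induction f with
  | zero => intro i hf _ m hm him; exact absurd hm (by omega)
  | succ f ih =>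
    intro i hf hnone m hm him
    rw [pvFindChGo] at hnone
    by_cases h : i < cs.length
    · rw [dif_pos h] at hnone
      by_cases hc : cs[i] = c
      · simp [hc] at hnone
      · rw [if_neg hc] at hnone
        by_cases hmi : m = i
        · subst hmi; exact hc
        · exact ih (i + 1) (by omega) hnone m hm (by omega)
    · omega

theorem pvFindCh_none (cs : List Char) (c : Char) (i : Nat)
    (h : pvFindCh cs c i = none) :
    ∀ m (_ : m < cs.length), i ≤ m → cs[m] ≠ c :=
  pvFindChGo_none cs c _ i (le_refl _) h

theorem pvFindChGo_some (cs : List Char) (c : Char) (f : Nat) :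
    ∀ i j, cs.length - i ≤ f → pvFindChGo cs c f i = some j →
    i ≤ j ∧ ∃ (hj : j < cs.length), cs[j] = c ∧
      ∀ m (_ : m < cs.length), i ≤ m → m < j → cs[m] ≠ c := by
  induction f with
  | zero => intro i j hf h; rw [pvFindChGo] at h; exact absurd h (by simp)
  | succ f ih =>
    intro i j hf h
    rw [pvFindChGo] at h
    by_cases hi : i < cs.length
    · rw [dif_pos hi] at h
      by_cases hc : cs[i] = c
      · rw [if_pos hc] at h
        obtain rfl : i = j := by simpa using h
        exact ⟨le_refl _, hi, hc, fun m hm him hmj => by omega⟩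
      · rw [if_neg hc] at h
        obtain ⟨h1, hj, h2, h3⟩ := ih (i + 1) j (by omega) h
        refine ⟨by omega, hj, h2, fun m hm him hmj => ?_⟩
        by_cases hmi : m = i
        · subst hmi; exact hc
        · exact h3 m hm (by omega) hmj
    · rw [dif_neg hi] at h; exact absurd h (by simp)

theorem pvFindCh_some (cs : List Char) (c : Char) (i j : Nat)
    (h : pvFindCh cs c i = some j) :
    i ≤ j ∧ ∃ (hj : j < cs.length), cs[j] = c ∧
      ∀ m (_ : m < cs.length), i ≤ m → m < j → cs[m] ≠ c :=
  pvFindChGo_some cs c _ i j (le_refl _) h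

-- if every some-result of the find for c is ≥ j, no c occurs in [i, j)
theorem pvNoCharBefore (cs : List Char) (c : Char) (i j : Nat)
    (h : ∀ x, pvFindCh cs c i = some x → j ≤ x) :
    ∀ m (_ : m < cs.length), i ≤ m → m < j → cs[m] ≠ c := by
  intro m hm him hmj
  cases hfc : pvFindCh cs c i with
  | none => exact pvFindCh_none cs c i hfc m hm him
  | some x =>
    obtain ⟨_, hx, _, h3⟩ := pvFindCh_some cs c i x hfc
    exact h3 m hm him (by have := h x hfc; omega)

-- ---- pvStrEnd: fuel irrelevance, unfolding, bounds ----
theorem pvStrEndGo_irrel (cs : List Char) (f1 f2 : Nat) :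
    ∀ i, cs.length - i ≤ f1 → cs.length - i ≤ f2 →
    pvStrEndGo cs f1 i = pvStrEndGo cs f2 i := by
  induction f1 generalizing f2 with
  | zero =>
    intro i h1 h2
    cases f2 with
    | zero => rfl
    | succ f2 =>
      rw [pvStrEndGo, pvStrEndGo]
      have : pvFindCh cs '"' i = none := by
        unfold pvFindCh; rw [show cs.length - i = 0 from by omega, pvFindChGo]
      rw [this]
  | succ f1 ih =>
    intro i h1 h2
    cases f2 with
    | zero =>
      rw [pvStrEndGo, pvStrEndGo]
      have : pvFindCh cs '"' i = none := by
        unfold pvFindCh; rw [show cs.length - i = 0 from by omega, pvFindChGo]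
      rw [this]
    | succ f2 =>
      rw [pvStrEndGo]
      conv_rhs => rw [pvStrEndGo]
      cases hf : pvFindCh cs '"' i with
      | none => rfl
      | some j =>
        dsimp only
        obtain ⟨hij, hj, _, _⟩ := pvFindCh_some cs '"' i j hf
        by_cases hp : pvBsRun cs j % 2 = 0
        · rw [if_pos hp, if_pos hp]
        · rw [if_neg hp, if_neg hp]
          exact ih f2 (j + 1) (by omega) (by omega)

theorem pvStrEnd_unfold (cs : List Char) (i : Nat) :
    pvStrEnd cs i =
      match pvFindCh cs '"' i with
      | none => cs.length
      | some j => if pvBsRun cs j % 2 = 0 then j + 1 else pvStrEnd cs (j + 1) := by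
  unfold pvStrEnd
  cases hn : cs.length - i with
  | zero =>
    have : pvFindCh cs '"' i = none := by
      unfold pvFindCh; rw [hn, pvFindChGo]
    rw [pvStrEndGo, this]
  | succ f =>
    rw [pvStrEndGo]
    cases hf : pvFindCh cs '"' i with
    | none => rfl
    | some j =>
      dsimp only
      obtain ⟨hij, hj, _, _⟩ := pvFindCh_some cs '"' i j hf
      by_cases hp : pvBsRun cs j % 2 = 0
      · simp [hp]
      · simp only [hp, if_false]
        exact pvStrEndGo_irrel cs f _ (j + 1) (by omega) (by omega)

theorem pvStrEndGo_bounds (cs : List Char) (f : Nat) :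
    ∀ i, i ≤ cs.length → i ≤ pvStrEndGo cs f i ∧ pvStrEndGo cs f i ≤ cs.length := by
  induction f with
  | zero => intro i hi; rw [pvStrEndGo]; omega
  | succ f ih =>
    intro i hi
    rw [pvStrEndGo]
    cases hf : pvFindCh cs '"' i with
    | none => dsimp only; omega
    | some j =>
      dsimp only
      obtain ⟨hij, hj, _, _⟩ := pvFindCh_some cs '"' i j hf
      by_cases hp : pvBsRun cs j % 2 = 0
      · simp only [hp, if_true]; omega
      · simp only [hp, if_false]
        have := ih (j + 1) (by omega)
        omega

theorem pvStrEnd_bounds (cs : List Char) (i : Nat) (hi : i ≤ cs.length) :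
    i ≤ pvStrEnd cs i ∧ pvStrEnd cs i ≤ cs.length :=
  pvStrEndGo_bounds cs _ i hi

-- ---- pvJump: fuel irrelevance and unfolding ----
theorem pvFindCh_of_past (cs : List Char) (c : Char) (i : Nat) (h : ¬ i < cs.length) :
    pvFindCh cs c i = none := by
  unfold pvFindCh; rw [show cs.length - i = 0 from by omega, pvFindChGo]

theorem pvJumpGo_irrel (cs : List Char) (o : Int) (f1 f2 : Nat) :
    ∀ d i, cs.length - i ≤ f1 → cs.length - i ≤ f2 →
    pvJumpGo cs o f1 d i = pvJumpGo cs o f2 d i := by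
  induction f1 generalizing f2 with
  | zero =>
    intro d i h1 h2
    cases f2 with
    | zero => rfl
    | succ f2 =>
      rw [pvJumpGo, pvJumpGo]
      rw [pvFindCh_of_past cs '"' i (by omega), pvFindCh_of_past cs '{' i (by omega),
        pvFindCh_of_past cs '}' i (by omega)]
      rfl
  | succ f1 ih =>
    intro d i h1 h2
    cases f2 with
    | zero =>
      rw [pvJumpGo, pvJumpGo]
      rw [pvFindCh_of_past cs '"' i (by omega), pvFindCh_of_past cs '{' i (by omega),
        pvFindCh_of_past cs '}' i (by omega)]
      rfl
    | succ f2 =>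
      rw [pvJumpGo]
      conv_rhs => rw [pvJumpGo]
      cases hmin : ((pvFindCh cs '"' i).toList ++ (pvFindCh cs '{' i).toList ++
          (pvFindCh cs '}' i).toList).min? with
      | none => rfl
      | some j =>
        dsimp only
        have hjmem := List.min?_mem hmin
        simp only [List.mem_append, Option.mem_toList] at hjmem
        have hij : i ≤ j ∧ j < cs.length := by
          rcases hjmem with (h' | h') | h'
          · obtain ⟨a, b, _⟩ := pvFindCh_some cs '"' i j h'; exact ⟨a, b⟩
          · obtain ⟨a, b, _⟩ := pvFindCh_some cs '{' i j h'; exact ⟨a, b⟩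
          · obtain ⟨a, b, _⟩ := pvFindCh_some cs '}' i j h'; exact ⟨a, b⟩
        by_cases hq : cs.getD j ' ' = '"'
        · simp only [hq, if_true]
          have hb := pvStrEnd_bounds cs (j + 1) (by omega)
          exact ih f2 d _ (by omega) (by omega)
        · simp only [hq, if_false]
          by_cases ho : cs.getD j ' ' = '{'
          · simp only [ho, if_true]
            exact ih f2 (d + 1) (j + 1) (by omega) (by omega)
          · simp only [ho, if_false]
            by_cases hd : d - 1 = 0
            · simp [hd]
            · simp only [hd, if_false]
              exact ih f2 (d - 1) (j + 1) (by omega) (by omega)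

theorem pvJump_unfold (cs : List Char) (o : Int) (d : Int) (i : Nat) :
    pvJump cs o d i =
      match ((pvFindCh cs '"' i).toList ++ (pvFindCh cs '{' i).toList ++
             (pvFindCh cs '}' i).toList).min? with
      | none => none
      | some j =>
        if cs.getD j ' ' = '"' then pvJump cs o d (pvStrEnd cs (j + 1))
        else if cs.getD j ' ' = '{' then pvJump cs o (d + 1) (j + 1)
        else if d - 1 = 0 then some (o, (j : Int) + 1)
        else pvJump cs o (d - 1) (j + 1) := by
  unfold pvJump
  cases hn : cs.length - i with
  | zero =>
    rw [pvJumpGo]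
    rw [pvFindCh_of_past cs '"' i (by omega), pvFindCh_of_past cs '{' i (by omega),
      pvFindCh_of_past cs '}' i (by omega)]
    rfl
  | succ f =>
    rw [pvJumpGo]
    cases hmin : ((pvFindCh cs '"' i).toList ++ (pvFindCh cs '{' i).toList ++
        (pvFindCh cs '}' i).toList).min? with
    | none => rfl
    | some j =>
      dsimp only
      have hjmem := List.min?_mem hmin
      simp only [List.mem_append, Option.mem_toList] at hjmem
      have hij : i ≤ j ∧ j < cs.length := by
        rcases hjmem with (h' | h') | h'
        · obtain ⟨a, b, _⟩ := pvFindCh_some cs '"' i j h'; exact ⟨a, b⟩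
        · obtain ⟨a, b, _⟩ := pvFindCh_some cs '{' i j h'; exact ⟨a, b⟩
        · obtain ⟨a, b, _⟩ := pvFindCh_some cs '}' i j h'; exact ⟨a, b⟩
      by_cases hq : cs.getD j ' ' = '"'
      · simp only [hq, if_true]
        have hb := pvStrEnd_bounds cs (j + 1) (by omega)
        exact pvJumpGo_irrel cs o f _ d _ (by omega) (by omega)
      · simp only [hq, if_false]
        by_cases ho : cs.getD j ' ' = '{'
        · simp only [ho, if_true]
          exact pvJumpGo_irrel cs o f _ (d + 1) (j + 1) (by omega) (by omega)
        · simp only [ho, if_false]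
          by_cases hd : d - 1 = 0
          · simp [hd]
          · simp only [hd, if_false]
            exact pvJumpGo_irrel cs o f _ (d - 1) (j + 1) (by omega) (by omega)

-- ---- walking A over uninteresting stretches ----
-- inside a string, A's escape flag at position m is exactly the parity of the
-- backslash run ending at m (no quote in between)
theorem pvWalkString (cs : List Char) (o : Int) (d : Int) :
    ∀ k i j, j - i ≤ k → i ≤ j → j ≤ cs.length →
    (∀ m (_ : m < cs.length), i ≤ m → m < j → cs[m] ≠ '"') →
    pvALoop cs o i d true (decide (pvBsRun cs i % 2 = 1)) =
      pvALoop cs o j d true (decide (pvBsRun cs j % 2 = 1)) := by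
  intro k
  induction k with
  | zero => intro i j hk hij hj hno; obtain rfl : i = j := (by omega); rfl
  | succ k ih =>
    intro i j hk hij hjn hno
    by_cases hij' : i = j
    · subst hij'; rfl
    · have hi : i < cs.length := by omega
      have hq : cs[i] ≠ '"' := hno i hi (le_refl _) (by omega)
      have hrun : pvBsRun cs (i + 1) = if cs[i] = '\\' then pvBsRun cs i + 1 else 0 := by
        rw [pvBsRun, dif_pos hi]
      have hstep : pvALoop cs o i d true (decide (pvBsRun cs i % 2 = 1)) =
          pvALoop cs o (i + 1) d true (decide (pvBsRun cs (i + 1) % 2 = 1)) := by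
        by_cases hp : pvBsRun cs i % 2 = 1
        · rw [show decide (pvBsRun cs i % 2 = 1) = true from by simp [hp]]
          rw [pvALoop_esc cs o d i hi]
          by_cases hb : cs[i] = '\\'
          · rw [show decide (pvBsRun cs (i + 1) % 2 = 1) = false from by
              simp [hrun, hb]; omega]
          · rw [show decide (pvBsRun cs (i + 1) % 2 = 1) = false from by
              simp [hrun, hb]]
        · rw [show decide (pvBsRun cs i % 2 = 1) = false from by simp [hp]]
          by_cases hb : cs[i] = '\\'
          · rw [pvALoop_str_bs cs o d i hi hb]
            rw [show decide (pvBsRun cs (i + 1) % 2 = 1) = true from by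
              simp [hrun, hb]; omega]
          · rw [pvALoop_str_o cs o d i hi hb hq]
            rw [show decide (pvBsRun cs (i + 1) % 2 = 1) = false from by
              simp [hrun, hb]]
      rw [hstep]
      exact ih (i + 1) j (by omega) (by omega) hjn
        (fun m hm him hmj => hno m hm (by omega) hmj)

-- A's string mode starting with a clear run lands exactly at pvStrEnd
theorem pvALoop_stringEnd (cs : List Char) (o : Int) (d : Int) :
    ∀ k i, cs.length - i ≤ k → pvBsRun cs i = 0 → i ≤ cs.length →
    pvALoop cs o i d true false = pvALoop cs o (pvStrEnd cs i) d false false := by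
  intro k
  induction k with
  | zero =>
    intro i hk h0 hin
    have hi : i = cs.length := by omega
    rw [pvStrEnd_unfold, pvFindCh_of_past cs '"' i (by omega)]
    rw [pvALoop_out cs o d i _ _ (by omega), pvALoop_out cs o d cs.length _ _ (by omega)]
  | succ k ih =>
    intro i hk h0 hin
    rw [pvStrEnd_unfold]
    cases hf : pvFindCh cs '"' i with
    | none =>
      dsimp only
      have hno := pvFindCh_none cs '"' i hf
      have e0 : decide (pvBsRun cs i % 2 = 1) = false := by simp [h0]
      have hw := pvWalkString cs o d (cs.length - i) i cs.length (by omega) hin (le_refl _)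
        (fun m hm him _ => hno m hm him)
      rw [e0] at hw
      rw [hw, pvALoop_out cs o d cs.length _ _ (by omega),
        pvALoop_out cs o d cs.length _ _ (by omega)]
    | some j =>
      dsimp only
      obtain ⟨hij, hj, hcj, hno⟩ := pvFindCh_some cs '"' i j hf
      have e0 : decide (pvBsRun cs i % 2 = 1) = false := by simp [h0]
      have hw := pvWalkString cs o d (j - i) i j (le_refl _) hij (by omega) hno
      rw [e0] at hw
      rw [hw]
      have hrun1 : pvBsRun cs (j + 1) = 0 := by
        rw [pvBsRun, dif_pos hj, if_neg (by rw [hcj]; decide)]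
      by_cases hp : pvBsRun cs j % 2 = 0
      · rw [if_pos hp, show decide (pvBsRun cs j % 2 = 1) = false from by simp; omega]
        exact pvALoop_str_q cs o d j hj hcj
      · rw [if_neg hp, show decide (pvBsRun cs j % 2 = 1) = true from by simp; omega]
        rw [pvALoop_esc cs o d j hj]
        exact ih (j + 1) (by omega) hrun1 (by omega)

-- walking A over a stretch with no '"', '{' or '}'
theorem pvWalkMain (cs : List Char) (o : Int) (d : Int) :
    ∀ k i j, j - i ≤ k → i ≤ j → j ≤ cs.length →
    (∀ m (_ : m < cs.length), i ≤ m → m < j →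
      cs[m] ≠ '"' ∧ cs[m] ≠ '{' ∧ cs[m] ≠ '}') →
    pvALoop cs o i d false false = pvALoop cs o j d false false := by
  intro k
  induction k with
  | zero => intro i j hk hij hj hno; obtain rfl : i = j := (by omega); rfl
  | succ k ih =>
    intro i j hk hij hjn hno
    by_cases hij' : i = j
    · subst hij'; rfl
    · have hi : i < cs.length := by omega
      obtain ⟨h1, h2, h3⟩ := hno i hi (le_refl _) (by omega)
      rw [pvALoop_main_o cs o d i hi h1 h2 h3]
      exact ih (i + 1) j (by omega) (by omega) hjn
        (fun m hm him hmj => hno m hm (by omega) hmj)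

-- ---- the main loop equivalence ----
theorem pvMainEq (cs : List Char) (o : Int) :
    ∀ k i d, cs.length - i ≤ k →
    pvALoop cs o i d false false = pvJump cs o d i := by
  intro k
  induction k with
  | zero =>
    intro i d hk
    rw [pvJump_unfold]
    rw [pvFindCh_of_past cs '"' i (by omega), pvFindCh_of_past cs '{' i (by omega),
      pvFindCh_of_past cs '}' i (by omega)]
    rw [pvALoop_out cs o d i _ _ (by omega)]
    rfl
  | succ k ih =>
    intro i d hk
    rw [pvJump_unfold]
    cases hmin : ((pvFindCh cs '"' i).toList ++ (pvFindCh cs '{' i).toList ++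
        (pvFindCh cs '}' i).toList).min? with
    | none =>
      have hnil := List.min?_eq_none_iff.1 hmin
      simp only [List.append_eq_nil_iff, Option.toList_eq_nil_iff] at hnil
      obtain ⟨⟨hq, ho⟩, hc⟩ := hnil
      by_cases hin : i ≤ cs.length
      · have hwalk := pvWalkMain cs o d (cs.length - i) i cs.length (by omega) hin (le_refl _)
          (fun m hm him _ => ⟨pvFindCh_none cs '"' i hq m hm him,
            pvFindCh_none cs '{' i ho m hm him, pvFindCh_none cs '}' i hc m hm him⟩)
        rw [hwalk, pvALoop_out cs o d cs.length _ _ (by omega)]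
      · rw [pvALoop_out cs o d i _ _ (by omega)]
    | some j =>
      dsimp only
      have hjmem := List.min?_mem hmin
      have hjle : ∀ b ∈ ((pvFindCh cs '"' i).toList ++ (pvFindCh cs '{' i).toList ++
          (pvFindCh cs '}' i).toList), j ≤ b := (List.min?_eq_some_iff.1 hmin).2
      simp only [List.mem_append, Option.mem_toList] at hjmem hjle
      have hij : i ≤ j ∧ j < cs.length ∧
          (cs[j]'(by rcases hjmem with (h' | h') | h'
                     · exact (pvFindCh_some cs '"' i j h').2.1
                     · exact (pvFindCh_some cs '{' i j h').2.1
                     · exact (pvFindCh_some cs '}' i j h').2.1) = '"' ∨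
           cs.getD j ' ' = '{' ∨ cs.getD j ' ' = '}') := by
        rcases hjmem with (h' | h') | h'
        · obtain ⟨a, b, c, _⟩ := pvFindCh_some cs '"' i j h'
          exact ⟨a, b, Or.inl c⟩
        · obtain ⟨a, b, c, _⟩ := pvFindCh_some cs '{' i j h'
          exact ⟨a, b, Or.inr (Or.inl (by rw [List.getD_eq_getElem cs ' ' b]; exact c))⟩
        · obtain ⟨a, b, c, _⟩ := pvFindCh_some cs '}' i j h'
          exact ⟨a, b, Or.inr (Or.inr (by rw [List.getD_eq_getElem cs ' ' b]; exact c))⟩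
      obtain ⟨hile, hjlt, hcs3⟩ := hij
      have hgetD : cs.getD j ' ' = cs[j] := List.getD_eq_getElem cs ' ' hjlt
      have hno : ∀ m (_ : m < cs.length), i ≤ m → m < j →
          cs[m] ≠ '"' ∧ cs[m] ≠ '{' ∧ cs[m] ≠ '}' := by
        intro m hm him hmj
        refine ⟨pvNoCharBefore cs '"' i j (fun x hx => hjle x (Or.inl (Or.inl hx))) m hm him hmj,
          pvNoCharBefore cs '{' i j (fun x hx => hjle x (Or.inl (Or.inr hx))) m hm him hmj,
          pvNoCharBefore cs '}' i j (fun x hx => hjle x (Or.inr hx)) m hm him hmj⟩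
      have hwalk := pvWalkMain cs o d (j - i) i j (le_refl _) hile (by omega) hno
      rw [hwalk]
      by_cases hq : cs.getD j ' ' = '"'
      · simp only [hq, if_true]
        rw [pvALoop_main_q cs o d j hjlt (hgetD ▸ hq)]
        have hrun1 : pvBsRun cs (j + 1) = 0 := by
          rw [pvBsRun, dif_pos hjlt, if_neg (by rw [← hgetD, hq]; decide)]
        rw [pvALoop_stringEnd cs o d (cs.length - (j + 1)) (j + 1) (le_refl _) hrun1 (by omega)]
        have hb := pvStrEnd_bounds cs (j + 1) (by omega)
        exact ih (pvStrEnd cs (j + 1)) d (by omega)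
      · simp only [hq, if_false]
        by_cases ho : cs.getD j ' ' = '{'
        · simp only [ho, if_true]
          rw [pvALoop_main_ob cs o d j hjlt (hgetD ▸ ho)]
          exact ih (j + 1) (d + 1) (by omega)
        · simp only [ho, if_false]
          have hc : cs.getD j ' ' = '}' := by
            rcases hcs3 with h' | h' | h'
            · exact absurd (hgetD.trans h') hq
            · exact absurd h' ho
            · exact h'
          rw [pvALoop_main_cb cs o d j hjlt (hgetD ▸ hc)]
          by_cases hd : d - 1 = 0
          · simp [hd]
          · simp only [hd, if_false]
            exact ih (j + 1) (d - 1) (by omega)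

-- ===== VERDICT (by name: the statement is the Claim_ definition above) =====
theorem find_json_object_boundaries_spec : Claim_equal_find_json_object_boundaries := by
  intro text start _
  unfold Spec_find_json_object_boundaries
  simp only [find_json_object_boundaries, find_json_object_boundaries_alt]
  split
  · rfl
  · exact pvMainEq _ _ text.toList.length _ _ (by omega)
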